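-- pv_equiv track=rewrite | github.com/kaikwanlau/miku-audio-analysis | miku-audio-analysis/scripts/step1_vocadb_fetch.py | extract_pvs
-- ===== SOURCE A (Python) =====
-- def extract_pvs(song_data):
--     """Extract Niconico and YouTube URLs from VocaDB song PVs."""
--     niconico_url = None
--     youtube_url = None
--
--     pvs = song_data.get("pvs", [])
--     for pv in pvs:
--         service = pv.get("service", "").lower()
--         pv_type = pv.get("pvType", "")
--         url = pv.get("url", "")
--
--         # Prefer Original PVs over Reprints
--         if service == "niconicodouga" and url:
--             if niconico_url is None or pv_type == "Original":
--                 niconico_url = url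
--         elif service == "youtube" and url:
--             if youtube_url is None or pv_type == "Original":
--                 youtube_url = url
--
--     return niconico_url, youtube_url
-- ===== SOURCE B (Python) =====
-- def extract_pvs(song_data):
--     """Extract Niconico and YouTube URLs from VocaDB song PVs."""
--     pvs = song_data.get("pvs", [])
--
--     def pick(service):
--         hits = [pv for pv in pvs
--                    if pv.get("service", "").lower() == service and pv.get("url", "")]
--         for pv in hits:
--             if pv.get("pvType", "") == "Original":
--                 return pv.get("url", "")
--         return hits[0].get("url", "") if hits else None
--
--     return pick("niconicodouga"), pick("youtube")
-- ===== Notes on version B (the rewrite author's own statement) =====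
-- stated objective: simpler
-- what changed: Replaces A's interleaved two-accumulator overwrite loop with a per-service pick() that filters the matching PVs once and returns the first Original (early return) else the first match; Pre_ excludes inputs where a service has several Original PVs with distinct urls, on which A's last-Original-wins tie-break is an accidental overwrite artefact and either choice is defensible.
import Mathlib
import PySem

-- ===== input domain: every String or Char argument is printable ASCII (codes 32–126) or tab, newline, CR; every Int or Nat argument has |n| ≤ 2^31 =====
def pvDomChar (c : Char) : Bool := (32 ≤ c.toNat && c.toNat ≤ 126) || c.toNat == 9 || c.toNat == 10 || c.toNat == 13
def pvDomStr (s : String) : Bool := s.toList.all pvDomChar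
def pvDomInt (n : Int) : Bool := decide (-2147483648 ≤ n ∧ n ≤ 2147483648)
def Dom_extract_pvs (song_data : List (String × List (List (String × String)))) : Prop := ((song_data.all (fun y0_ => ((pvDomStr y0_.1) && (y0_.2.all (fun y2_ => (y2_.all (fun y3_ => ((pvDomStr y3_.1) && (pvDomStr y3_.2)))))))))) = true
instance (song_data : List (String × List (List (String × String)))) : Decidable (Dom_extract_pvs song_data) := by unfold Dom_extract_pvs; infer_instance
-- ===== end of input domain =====

-- B replaces A's interleaved two-accumulator overwrite loop by a per-service pick helper
-- (filter once, first Original via early return, else first match); objective: simpler.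
-- Pre_ excludes inputs where a service has several Original PVs with distinct urls, where
-- A's last-Original-wins overwrite and B's first-Original are both defensible tie-breaks.


-- ===== PORT A =====
-- A's loop body (same branch order as the Python)
def extractStep (acc : Option String × Option String) (pv : List (String × String)) :
    Option String × Option String :=
  let service := PySem.Str.lower ((PySem.Dict.mk pv).getD "service" "")
  let pv_type := (PySem.Dict.mk pv).getD "pvType" ""
  let url := (PySem.Dict.mk pv).getD "url" ""
  if service = "niconicodouga" ∧ url ≠ "" then
    if acc.1 = none ∨ pv_type = "Original" then (some url, acc.2) else acc
  else if service = "youtube" ∧ url ≠ "" then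
    if acc.2 = none ∨ pv_type = "Original" then (acc.1, some url) else acc
  else acc

def extract_pvs (song_data : List (String × List (List (String × String)))) : Option String × Option String :=
  let pvs := (PySem.Dict.mk song_data).getD "pvs" []
  pvs.foldl extractStep (none, none)

-- ===== PORT B =====
def pvService (pv : List (String × String)) : String :=
  PySem.Str.lower ((PySem.Dict.mk pv).getD "service" "")

def pvUrl (pv : List (String × String)) : String := (PySem.Dict.mk pv).getD "url" ""

def pvType (pv : List (String × String)) : String := (PySem.Dict.mk pv).getD "pvType" ""

-- Source B's pick(service): filter the matching pvs once, scan for the first Original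
-- (the for-loop with early return = find?), else the first match
def pick (pvs : List (List (String × String))) (service : String) : Option String :=
  let hits := pvs.filter (fun pv => pvService pv == service && pvUrl pv != "")
  match hits.find? (fun pv => pvType pv == "Original") with
  | some pv => some (pvUrl pv)
  | none => hits.head?.map pvUrl

def extract_pvs_alt (song_data : List (String × List (List (String × String)))) : Option String × Option String :=
  let pvs := (PySem.Dict.mk song_data).getD "pvs" []
  (pick pvs "niconicodouga", pick pvs "youtube")

-- ===== PRECONDITION & SPEC =====
-- the Original urls (truthy url, matching service) of a pv list
def origUrls (pvs : List (List (String × String))) (service : String) : List String :=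
  (pvs.filter (fun pv => pvService pv == service && pvUrl pv != "" && pvType pv == "Original")).map pvUrl

-- Pre_ excludes inputs where some service has several Original PVs with DISTINCT urls:
-- there A's accidental last-Original-wins overwrite and B's first-Original differ and
-- neither tie-break is specified; everywhere else the two agree.
def Pre_extract_pvs (song_data : List (String × List (List (String × String)))) : Prop :=
  let pvs := (PySem.Dict.mk song_data).getD "pvs" []
  (∀ u ∈ origUrls pvs "niconicodouga", (origUrls pvs "niconicodouga").head? = some u) ∧
  (∀ u ∈ origUrls pvs "youtube", (origUrls pvs "youtube").head? = some u)
instance (song_data : List (String × List (List (String × String)))) : Decidable (Pre_extract_pvs song_data) := by unfold Pre_extract_pvs; infer_instance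

def pvWitness_extract_pvs : (List (String × List (List (String × String)))) :=
  [("pvs", [[("service", "NicoNicoDouga"), ("pvType", "Reprint"), ("url", "n1")],
            [("service", "YouTube"), ("pvType", "Original"), ("url", "y1")]])]

def Spec_extract_pvs (song_data : List (String × List (List (String × String)))) (out : Option String × Option String) : Prop := out = extract_pvs_alt song_data
instance (song_data : List (String × List (List (String × String)))) (out : Option String × Option String) : Decidable (Spec_extract_pvs song_data out) := by unfold Spec_extract_pvs; infer_instance

-- ===== CLAIM (what is proved, stated in full; the proofs are below) =====
def Claim_equal_extract_pvs : Prop := ∀ (song_data : List (String × List (List (String × String)))), Dom_extract_pvs song_data → Pre_extract_pvs song_data → Spec_extract_pvs song_data (extract_pvs song_data)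

-- ===== LEMMAS AND PROOFS =====

theorem getLast?_cons_eq_or {α : Type} (x : α) (l : List α) :
    (x :: l).getLast? = l.getLast?.or (some x) := by
  cases h : l.getLast? with
  | none =>
    have : l = [] := by
      cases l with
      | nil => rfl
      | cons y ys => simp [List.getLast?_cons] at h
    simp [this]
  | some u =>
    cases l with
    | nil => simp at h
    | cons y ys => simp [List.getLast?_cons] at h ⊢; exact h

-- the loop invariant: A's fold from an arbitrary accumulator, characterised by lists
theorem fold_char (pvs : List (List (String × String))) (a b : Option String) :
    pvs.foldl extractStep (a, b) =
      ( (origUrls pvs "niconicodouga").getLast?.or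
          (a.or ((pvs.filter (fun pv => pvService pv == "niconicodouga" && pvUrl pv != "")).map pvUrl).head?),
        (origUrls pvs "youtube").getLast?.or
          (b.or ((pvs.filter (fun pv => pvService pv == "youtube" && pvUrl pv != "")).map pvUrl).head?) ) := by
  induction pvs generalizing a b with
  | nil => simp [origUrls]
  | cons pv rest ih =>
    simp only [List.foldl_cons]
    by_cases hn : pvService pv = "niconicodouga"
    · have hy : pvService pv ≠ "youtube" := by rw [hn]; decide
      by_cases hu : pvUrl pv = ""
      · have hstep : extractStep (a, b) pv = (a, b) := by
          simp [extractStep, pvService, pvUrl] at hn hu ⊢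
          simp [hn, hu]
        rw [hstep, ih]
        simp [origUrls, hn, hu]
      · by_cases ht : pvType pv = "Original"
        · have hstep : extractStep (a, b) pv = (some (pvUrl pv), b) := by
            simp [extractStep, pvService, pvUrl, pvType] at hn hu ht ⊢
            simp [hn, hu, ht]
          rw [hstep, ih]
          simp [origUrls, hn, hu, ht, getLast?_cons_eq_or]
        · have hstep : extractStep (a, b) pv =
              (if a = none then (some (pvUrl pv), b) else (a, b)) := by
            simp [extractStep, pvService, pvUrl, pvType] at hn hu ht ⊢
            simp [hn, hu, ht]
          rw [hstep]
          cases a with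
          | none => rw [if_pos rfl, ih]; simp [origUrls, hn, hu, ht]
          | some x => rw [if_neg (by simp), ih]; simp [origUrls, hn, hu, ht, Option.or]
    · by_cases hy : pvService pv = "youtube"
      · by_cases hu : pvUrl pv = ""
        · have hstep : extractStep (a, b) pv = (a, b) := by
            simp [extractStep, pvService, pvUrl] at hn hy hu ⊢
            simp [hy, hu]
          rw [hstep, ih]
          simp [origUrls, hy, hu]
        · by_cases ht : pvType pv = "Original"
          · have hstep : extractStep (a, b) pv = (a, some (pvUrl pv)) := by
              simp [extractStep, pvService, pvUrl, pvType] at hn hy hu ht ⊢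
              simp [hy, hu, ht]
            rw [hstep, ih]
            simp [origUrls, hy, hu, ht, getLast?_cons_eq_or]
          · have hstep : extractStep (a, b) pv =
                (if b = none then (a, some (pvUrl pv)) else (a, b)) := by
              simp [extractStep, pvService, pvUrl, pvType] at hn hy hu ht ⊢
              simp [hy, hu, ht]
            rw [hstep]
            cases b with
            | none => rw [if_pos rfl, ih]; simp [origUrls, hy, hu, ht]
            | some x => rw [if_neg (by simp), ih]; simp [origUrls, hy, hu, ht, Option.or]
      · have hstep : extractStep (a, b) pv = (a, b) := by
          simp [extractStep, pvService] at hn hy ⊢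
          simp [hn, hy]
        rw [hstep, ih]
        simp [origUrls, hn, hy]

-- find? over a filtered list = head? of the doubly filtered list, mapped
theorem head?_filter_eq_find? {α : Type} (p : α → Bool) (l : List α) :
    (l.filter p).head? = l.find? p := by
  induction l with
  | nil => rfl
  | cons x xs ih => by_cases h : p x <;> simp [h, ih]

-- B's pick, characterised by the same lists but with head? in place of A's getLast?
theorem pick_eq (pvs : List (List (String × String))) (s : String) :
    pick pvs s =
      (origUrls pvs s).head?.or
        (((pvs.filter (fun pv => pvService pv == s && pvUrl pv != "")).map pvUrl).head?) := by
  have h1 : pvs.filter (fun pv => pvService pv == s && pvUrl pv != "" && pvType pv == "Original")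
      = (pvs.filter (fun pv => pvService pv == s && pvUrl pv != "")).filter
          (fun pv => pvType pv == "Original") := by
    rw [List.filter_filter]
    apply List.filter_congr
    intro pv _
    cases hA : (pvService pv == s) <;> cases hB : (pvUrl pv != "") <;>
      cases hC : (pvType pv == "Original") <;> simp
  have h2 : (origUrls pvs s).head? =
      ((pvs.filter (fun pv => pvService pv == s && pvUrl pv != "")).find?
        (fun pv => pvType pv == "Original")).map pvUrl := by
    unfold origUrls
    rw [h1, List.head?_map, head?_filter_eq_find?]
  show (match (pvs.filter (fun pv => pvService pv == s && pvUrl pv != "")).find?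
          (fun pv => pvType pv == "Original") with
        | some pv => some (pvUrl pv)
        | none => (pvs.filter (fun pv => pvService pv == s && pvUrl pv != "")).head?.map pvUrl) =
      (origUrls pvs s).head?.or
        (((pvs.filter (fun pv => pvService pv == s && pvUrl pv != "")).map pvUrl).head?)
  rw [h2, List.head?_map]
  cases (pvs.filter (fun pv => pvService pv == s && pvUrl pv != "")).find?
      (fun pv => pvType pv == "Original") <;> simp [Option.or]

-- under Pre_ (all Original urls equal), last = first
theorem getLast?_eq_head?_of_all_head {α : Type} (l : List α)
    (h : ∀ u ∈ l, l.head? = some u) : l.getLast? = l.head? := by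
  cases hl : l.getLast? with
  | none =>
    have : l = [] := List.getLast?_eq_none_iff.mp hl
    simp [this]
  | some u =>
    have hu : u ∈ l := List.mem_of_getLast? hl
    rw [h u hu]

-- ===== VERDICT (by name: the statement is the Claim_ definition above) =====
theorem extract_pvs_spec : Claim_equal_extract_pvs := by
  intro song_data _ hpre
  unfold Spec_extract_pvs extract_pvs extract_pvs_alt
  obtain ⟨h1, h2⟩ := hpre
  rw [fold_char]
  dsimp only
  rw [pick_eq, pick_eq,
      getLast?_eq_head?_of_all_head _ h1, getLast?_eq_head?_of_all_head _ h2]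
  simp
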